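-- pv_equiv track=rewrite | github.com/tianren/psm | psm.py | enum_subsquence_with_complement
-- ===== SOURCE A (Python) =====
-- def enum_subsquence_with_complement(par):
--     if len(par) == 0:
--         yield tuple(), tuple()
--     else:
--         tail = par[-1]
--         tailstart = par.index(tail)
--         tailcount = len(par) - tailstart
--         for _head,_comp in enum_subsquence_with_complement(par[:tailstart]):
--             for i in range(tailcount+1):
--                 yield _head + i*(tail,), _comp + (tailcount-i)*(tail,)
-- ===== SOURCE B (Python) =====
-- def _expand(groups):
--     if not groups:
--         return [((), ())]
--     (v, c) = groups[0]
--     sub = _expand(groups[1:])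
--     return [(i * (v,) + h, (c - i) * (v,) + m)
--             for i in range(c + 1) for (h, m) in sub]
--
--
-- def enum_subsquence_with_complement(par):
--     groups = []
--     rest = par
--     while len(rest) > 0:
--         v = rest[-1]
--         s = rest.index(v)
--         groups = [(v, len(rest) - s)] + groups
--         rest = rest[:s]
--     for pair in _expand(groups):
--         yield pair
-- ===== Notes on version B (the rewrite author's own statement) =====
-- stated objective: alternative
-- what changed: A's single suffix recursion (peel last group, append copies to each recursive pair) is split into an iterative grouping loop that peels the tuple into (value,count) groups, followed by a separate front-recursive cartesian-product expansion that prepends copies; same output order, same-order cost.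
import Mathlib
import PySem

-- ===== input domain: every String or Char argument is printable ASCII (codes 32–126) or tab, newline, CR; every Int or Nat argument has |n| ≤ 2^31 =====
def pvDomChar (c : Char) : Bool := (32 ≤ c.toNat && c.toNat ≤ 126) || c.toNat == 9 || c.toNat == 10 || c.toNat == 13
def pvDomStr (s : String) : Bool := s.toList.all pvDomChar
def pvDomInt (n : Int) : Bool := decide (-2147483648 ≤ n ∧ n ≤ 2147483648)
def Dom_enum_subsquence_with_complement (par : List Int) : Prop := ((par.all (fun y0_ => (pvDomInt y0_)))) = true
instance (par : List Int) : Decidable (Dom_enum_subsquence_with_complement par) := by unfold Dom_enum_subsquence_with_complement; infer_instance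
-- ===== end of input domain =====

-- B splits A's suffix recursion into an iterative grouping pass plus a separate
-- front-recursive product expansion; same values, same order (objective: alternative).


-- termination helper for both ports: the peeled prefix par[:par.index(par[-1])] is shorter
theorem pvPeel_lt (par : List Int) (h : ¬ par.length = 0) :
    (PySem.List.slice par none
      (some (((PySem.List.index? par ((PySem.List.pyGet? par (-1)).getD 0)).getD 0 : Nat) : Int))).length
      < par.length := by
  have hne : par ≠ [] := by intro hn; simp [hn] at h
  have hget : PySem.List.pyGet? par (-1) = some (par.getLast hne) := by
    rw [PySem.List.pyGet?_neg_one]; exact List.getLast?_eq_some_getLast hne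
  have hmem : ((PySem.List.pyGet? par (-1)).getD 0) ∈ par := by
    rw [hget]; exact List.getLast_mem hne
  have hsome : (PySem.List.index? par ((PySem.List.pyGet? par (-1)).getD 0)).isSome := by
    rw [PySem.List.index?_isSome_iff]; exact hmem
  obtain ⟨k, hk⟩ := Option.isSome_iff_exists.mp hsome
  obtain ⟨hklt, -, -⟩ := PySem.List.getElem_of_index?_eq_some hk
  rw [hk, PySem.List.slice_to_natCast]
  simp only [Option.getD_some, List.length_take]
  omega

-- ===== PORT A =====
-- par[-1] and par.index(tail) never raise here (par is nonempty and tail = par[-1] ∈ par),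
-- so the .getD 0 defaults are unreachable; the function is total.
def enum_subsquence_with_complement (par : List Int) : List (List Int × List Int) :=
  if _h : par.length = 0 then [(([] : List Int), ([] : List Int))]
  else
    let tail : Int := (PySem.List.pyGet? par (-1)).getD 0
    let tailstart : Nat := (PySem.List.index? par tail).getD 0
    let tailcount : Nat := par.length - tailstart
    (enum_subsquence_with_complement (PySem.List.slice par none (some (tailstart : Int)))).flatMap
      (fun p => (PySem.List.pyRange 0 ((tailcount : Int) + 1) 1).map
        (fun i => (p.1 ++ PySem.List.pyRepeat [tail] i,
                   p.2 ++ PySem.List.pyRepeat [tail] ((tailcount : Int) - i))))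
termination_by par.length
decreasing_by exact pvPeel_lt par _h

-- ===== PORT B =====
-- B's grouping loop: while rest: peel the last run into (value, count), prepending.
def pvGroupsAux (par : List Int) (acc : List (Int × Nat)) : List (Int × Nat) :=
  if _h : par.length = 0 then acc
  else
    let v : Int := (PySem.List.pyGet? par (-1)).getD 0
    let s : Nat := (PySem.List.index? par v).getD 0
    pvGroupsAux (PySem.List.slice par none (some (s : Int))) ((v, par.length - s) :: acc)
termination_by par.length
decreasing_by exact pvPeel_lt par _h

-- B's expansion: front recursion over the group list, prepending copies (B's _expand).
def pvExpand : List (Int × Nat) → List (List Int × List Int)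
  | [] => [(([] : List Int), ([] : List Int))]
  | (v, c) :: gs =>
      (List.range (c + 1)).flatMap (fun i =>
        (pvExpand gs).map (fun p =>
          (List.replicate i v ++ p.1, List.replicate (c - i) v ++ p.2)))

def enum_subsquence_with_complement_alt (par : List Int) : List (List Int × List Int) :=
  pvExpand (pvGroupsAux par [])

-- ===== PRECONDITION & SPEC =====
def Spec_enum_subsquence_with_complement (par : List Int) (out : List (List Int × List Int)) : Prop := out = enum_subsquence_with_complement_alt par
instance (par : List Int) (out : List (List Int × List Int)) : Decidable (Spec_enum_subsquence_with_complement par out) := by unfold Spec_enum_subsquence_with_complement; infer_instance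

-- ===== CLAIM (what is proved, stated in full; the proofs are below) =====
def Claim_equal_enum_subsquence_with_complement : Prop := ∀ (par : List Int), Dom_enum_subsquence_with_complement par → Spec_enum_subsquence_with_complement par (enum_subsquence_with_complement par)

-- ===== LEMMAS AND PROOFS =====

-- appending one group on the right of the group list = A's one expansion step
theorem pvExpand_append (gs : List (Int × Nat)) (v : Int) (c : Nat) :
    pvExpand (gs ++ [(v, c)]) =
      (pvExpand gs).flatMap (fun p => (List.range (c + 1)).map
        (fun i => (p.1 ++ List.replicate i v, p.2 ++ List.replicate (c - i) v))) := by
  induction gs with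
  | nil =>
      simp only [List.nil_append, pvExpand, List.flatMap_cons, List.flatMap_nil,
        List.append_nil, List.map_cons, List.map_nil, List.append_nil]
      induction (List.range (c + 1)) with
      | nil => rfl
      | cons a t iht => simp_all [List.flatMap_cons]
  | cons g t ih =>
      obtain ⟨w, d⟩ := g
      simp only [List.cons_append, pvExpand, ih, List.flatMap_assoc]
      congr 1; funext j
      simp only [List.flatMap_map, List.map_flatMap]
      congr 1; funext p
      simp [List.map_map, Function.comp, List.append_assoc]

-- the accumulator of the grouping loop is a suffix
theorem pvGroupsAux_acc (par : List Int) (acc : List (Int × Nat)) :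
    pvGroupsAux par acc = pvGroupsAux par [] ++ acc := by
  induction hlen : par.length using Nat.strong_induction_on generalizing par acc with
  | _ n ih =>
      by_cases h : par.length = 0
      · conv_lhs => rw [pvGroupsAux]
        conv_rhs => rw [pvGroupsAux]
        simp [h]
      · have hlt := pvPeel_lt par h
        conv_lhs => rw [pvGroupsAux]
        conv_rhs => rw [pvGroupsAux]
        simp only [h, dite_false]
        rw [ih _ (hlen ▸ hlt) _ _ rfl]
        conv_rhs => rw [ih _ (hlen ▸ hlt) _ _ rfl]
        simp

-- one peeling step of the grouping loop, accumulator flushed to the right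
theorem pvGroups_cons (par : List Int) (h : ¬ par.length = 0) :
    pvGroupsAux par [] =
      pvGroupsAux (PySem.List.slice par none
          (some (((PySem.List.index? par ((PySem.List.pyGet? par (-1)).getD 0)).getD 0 : Nat) : Int))) [] ++
        [(((PySem.List.pyGet? par (-1)).getD 0 : Int),
          par.length - (PySem.List.index? par ((PySem.List.pyGet? par (-1)).getD 0)).getD 0)] := by
  conv_lhs => rw [pvGroupsAux]
  simp only [h, dite_false]
  rw [pvGroupsAux_acc]

-- main bridge: A's recursion computes pvExpand of B's groups
theorem pvMain (par : List Int) :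
    enum_subsquence_with_complement par = pvExpand (pvGroupsAux par []) := by
  induction hlen : par.length using Nat.strong_induction_on generalizing par with
  | _ n ih =>
      by_cases h : par.length = 0
      · conv_lhs => rw [enum_subsquence_with_complement]
        conv_rhs => rw [pvGroupsAux]
        simp [h, pvExpand]
      · have hlt := pvPeel_lt par h
        conv_lhs => rw [enum_subsquence_with_complement]
        simp only [h, dite_false]
        rw [ih _ (hlen ▸ hlt) _ rfl, pvGroups_cons par h, pvExpand_append]
        congr 1; funext p
        rw [PySem.List.pyRange_one]
        simp only [sub_zero, List.map_map]
        have hT : (((par.length - (PySem.List.index? par ((PySem.List.pyGet? par (-1)).getD 0)).getD 0 : Nat) : Int) + 1).toNat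
            = (par.length - (PySem.List.index? par ((PySem.List.pyGet? par (-1)).getD 0)).getD 0) + 1 := by omega
        rw [hT]
        apply List.map_congr_left
        intro k hk
        simp only [List.mem_range] at hk
        simp only [Function.comp, zero_add, PySem.List.pyRepeat_singleton]
        apply Prod.ext <;> (simp only []; congr 2 <;> omega)

-- ===== VERDICT (by name: the statement is the Claim_ definition above) =====
theorem enum_subsquence_with_complement_spec : Claim_equal_enum_subsquence_with_complement := by
  intro par _
  unfold Spec_enum_subsquence_with_complement enum_subsquence_with_complement_alt
  exact pvMain par
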